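-- pv_equiv track=rewrite | github.com/VladMack/GB_python_seminar5_homework | RLE.py | coding
-- ===== SOURCE A (Python) =====
-- def coding(text):
--     counter = 1
--     coded = ''
--     i = 0
--     while i < len(text):
--         for j in range(i+1, len(text)):
--             if text[j] == text[i]:
--                 counter += 1
--         if counter == 1:
--             coded += f'{text[i]}'
--         else:
--             coded += f'#{counter}{text[i]}'
--         i += counter
--         counter = 1
--     return coded
-- ===== SOURCE B (Python) =====
-- def coding(text):
--     n = len(text)
--     # occ[i] = number of occurrences of text[i] in text[i:], via one backward pass
--     occ = [0] * n
--     freq = {}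
--     for i in range(n - 1, -1, -1):
--         c = text[i]
--         freq[c] = freq.get(c, 0) + 1
--         occ[i] = freq[c]
--     out = []
--     i = 0
--     while i < n:
--         k = occ[i]
--         if k == 1:
--             out.append(text[i])
--         else:
--             out.append(f'#{k}{text[i]}')
--         i += k
--     return ''.join(out)
-- ===== Notes on version B (the rewrite author's own statement) =====
-- stated objective: faster
-- what changed: Replaced the O(n^2) inner rescans (counting text[i] in the suffix at every emitted position) with a single backward pass that precomputes per-position suffix occurrence counts in a frequency dict, then a linear emit loop reads them.
import Mathlib
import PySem

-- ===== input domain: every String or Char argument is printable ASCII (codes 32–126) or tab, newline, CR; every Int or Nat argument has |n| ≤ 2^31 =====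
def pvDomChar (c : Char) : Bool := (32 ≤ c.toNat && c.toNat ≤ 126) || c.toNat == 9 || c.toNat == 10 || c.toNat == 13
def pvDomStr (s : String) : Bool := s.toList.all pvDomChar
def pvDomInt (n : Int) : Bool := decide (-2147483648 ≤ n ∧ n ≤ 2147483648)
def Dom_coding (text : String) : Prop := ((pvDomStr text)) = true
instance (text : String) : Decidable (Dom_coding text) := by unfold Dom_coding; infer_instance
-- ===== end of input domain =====

-- B replaces A's per-position suffix rescans with one backward pass precomputing suffix
-- occurrence counts in a frequency dict (objective: faster).

-- ===== PORT A =====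
-- Port of A: at each position, the inner `for j in range(i+1, len(text))` rescan is the
-- foldl over the remaining suffix; `i += counter` is the drop by (counter - 1) on that
-- suffix, and `coded +=` is the concatenation of the pieces in order.
def codingLoop (cur : List Char) : List Char :=
  match cur with
  | [] => []
  | c :: rest =>
    let counter : Int := rest.foldl (fun k x => if x == c then k + 1 else k) 1
    let piece : List Char :=
      if counter = 1 then [c] else '#' :: (PySem.Int.toChars counter ++ [c])
    piece ++ codingLoop (rest.drop (counter - 1).toNat)
termination_by cur.length
decreasing_by simp only [List.length_drop, List.length_cons]; omega

def coding (text : String) : String := String.ofList (codingLoop text.toList)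

-- ===== PORT B =====
-- Backward pass of B (`for i in range(n-1, -1, -1)`): structural recursion from the right,
-- returning the frequency dict together with the (text[i], occ[i]) pairs in order.
def buildOcc (l : List Char) : PySem.Dict Char Int × List (Char × Int) :=
  match l with
  | [] => (PySem.Dict.empty, [])
  | c :: rest =>
    let (d, ps) := buildOcc rest
    let n := d.getD c 0 + 1
    (d.insert c n, (c, n) :: ps)

-- B's emit loop: reads the precomputed count, collects the piece into `out`, jumps ahead;
-- ''.join(out) is the flatten at the end.
def emitLoop (ps : List (Char × Int)) : List (List Char) :=
  match ps with
  | [] => []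
  | (c, n) :: rest =>
    let piece : List Char :=
      if n = 1 then [c] else '#' :: (PySem.Int.toChars n ++ [c])
    piece :: emitLoop (rest.drop (n - 1).toNat)
termination_by ps.length
decreasing_by simp only [List.length_drop, List.length_cons]; omega

def coding_alt (text : String) : String := String.ofList (emitLoop (buildOcc text.toList).2).flatten

-- ===== PRECONDITION & SPEC =====
def Spec_coding (text : String) (out : String) : Prop := out = coding_alt text
instance (text : String) (out : String) : Decidable (Spec_coding text out) := by unfold Spec_coding; infer_instance

-- ===== CLAIM (what is proved, stated in full; the proofs are below) =====
def Claim_equal_coding : Prop := ∀ (text : String), Dom_coding text → Spec_coding text (coding text)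

-- ===== LEMMAS AND PROOFS =====

-- the dict built by the backward pass holds exactly the suffix occurrence counts
theorem buildOcc_fst_getD (l : List Char) (c : Char) :
    (buildOcc l).1.getD c 0 = (l.count c : Int) := by
  induction l with
  | nil => simp [buildOcc, PySem.Dict.getD, PySem.Dict.get?, PySem.Dict.empty]
  | cons a rest ih =>
    simp only [buildOcc, List.count_cons]
    rw [PySem.Dict.getD_insert]
    by_cases h : c = a
    · subst h; simp [ih]
    · simp [h, ih, Ne.symm h]

theorem buildOcc_snd_cons (a : Char) (rest : List Char) :
    (buildOcc (a :: rest)).2 = (a, (rest.count a : Int) + 1) :: (buildOcc rest).2 := by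
  simp [buildOcc, buildOcc_fst_getD]

theorem buildOcc_snd_drop (l : List Char) (k : Nat) :
    ((buildOcc l).2).drop k = (buildOcc (l.drop k)).2 := by
  induction l generalizing k with
  | nil => simp [buildOcc]
  | cons a rest ih =>
    cases k with
    | zero => simp
    | succ k => rw [buildOcc_snd_cons]; simpa using ih k

theorem main_eq (l : List Char) :
    (emitLoop (buildOcc l).2).flatten = codingLoop l := by
  induction hn : l.length using Nat.strong_induction_on generalizing l with
  | _ n ih =>
    cases l with
    | nil => rw [buildOcc, emitLoop, codingLoop]; rfl
    | cons c rest =>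
      rw [buildOcc_snd_cons, emitLoop, codingLoop]
      rw [PySem.List.foldl_beq_add_one, buildOcc_snd_drop]
      simp only [List.flatten_cons, Int.add_comm 1, add_sub_cancel_right, Int.toNat_natCast]
      congr 1
      exact ih _ (by subst hn; simp only [List.length_cons, List.length_drop]; omega) _ rfl

-- ===== VERDICT (by name: the statement is the Claim_ definition above) =====
theorem coding_spec : Claim_equal_coding := by
  intro text _
  unfold Spec_coding coding coding_alt
  exact congrArg String.ofList (main_eq _).symm
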